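-- pv_equiv track=rewrite | github.com/kmeranda/disfluency_remover | disfluency_remover.py | new_get_tprime
-- ===== SOURCE A (Python) =====
-- def new_get_tprime(n, tags, all_tags):
-- 	# base case
-- 	if n == 1:
-- 		return all_tags
-- 	# go another level
-- 	new_t = []
-- 	for tp in all_tags:
-- 		for t in tags:
-- 			new_t.append(tp+t)
-- 	# recurse
-- 	return new_get_tprime(n-1, tags, new_t)
-- ===== SOURCE B (Python) =====
-- def new_get_tprime(n, tags, all_tags):
--     result = all_tags
--     for _ in range(n - 1):
--         result = [tp + t for tp in result for t in tags]
--     return result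
-- ===== Notes on version B (the rewrite author's own statement) =====
-- stated objective: simpler
-- what changed: Replaced the tail recursion (which builds new_t with nested appends, then recurses on n-1) with a single iterative loop that rebuilds the accumulator n-1 times via a comprehension; no recursion and no append calls.
import Mathlib
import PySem

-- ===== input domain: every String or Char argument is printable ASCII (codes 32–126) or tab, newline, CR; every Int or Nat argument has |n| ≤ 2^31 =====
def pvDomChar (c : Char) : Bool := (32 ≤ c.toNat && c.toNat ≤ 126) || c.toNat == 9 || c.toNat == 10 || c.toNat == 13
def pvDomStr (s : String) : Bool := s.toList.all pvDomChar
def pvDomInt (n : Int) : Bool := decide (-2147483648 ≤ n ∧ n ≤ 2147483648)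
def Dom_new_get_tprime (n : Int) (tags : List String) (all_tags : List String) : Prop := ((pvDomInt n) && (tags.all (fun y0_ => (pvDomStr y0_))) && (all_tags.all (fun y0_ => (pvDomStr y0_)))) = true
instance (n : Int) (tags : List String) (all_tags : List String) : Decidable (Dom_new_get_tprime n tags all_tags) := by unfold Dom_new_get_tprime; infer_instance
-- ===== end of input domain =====

-- B replaces A's tail recursion by an iterative accumulator loop (simpler, same cost).

-- ===== PORT A =====
-- Fuel = n.toNat; for n ≥ 1 this is exactly A's recursion (fuel 0 is unreachable inside Pre_:
-- Python A recurses forever there and raises RecursionError).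
def new_get_tprime_go : Nat → List String → List String → List String
  | 0, _, at_ => at_
  | Nat.succ k, tags, at_ =>
      if k = 0 then at_   -- n == 1: base case
      else
        -- new_t built by nested appends, then recurse on n-1
        new_get_tprime_go k tags
          (at_.foldl (fun new_t tp => tags.foldl (fun acc t => acc ++ [tp ++ t]) new_t) [])

def new_get_tprime (n : Int) (tags : List String) (all_tags : List String) : List String :=
  new_get_tprime_go n.toNat tags all_tags

-- ===== PORT B =====
def new_get_tprime_alt (n : Int) (tags : List String) (all_tags : List String) : List String :=
  (List.range (n - 1).toNat).foldl
    (fun result _ => result.flatMap (fun tp => tags.map (fun t => tp ++ t)))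
    all_tags

-- ===== PRECONDITION & SPEC =====
-- Pre_ excludes n ≤ 0, where Python A recurses without bound and raises RecursionError.
def Pre_new_get_tprime (n : Int) (tags : List String) (all_tags : List String) : Prop := 1 ≤ n
instance (n : Int) (tags : List String) (all_tags : List String) : Decidable (Pre_new_get_tprime n tags all_tags) := by unfold Pre_new_get_tprime; infer_instance
def pvWitness_new_get_tprime : Int × List String × List String := (2, ["a", "b"], ["x"])

def Spec_new_get_tprime (n : Int) (tags : List String) (all_tags : List String) (out : List String) : Prop := out = new_get_tprime_alt n tags all_tags
instance (n : Int) (tags : List String) (all_tags : List String) (out : List String) : Decidable (Spec_new_get_tprime n tags all_tags out) := by unfold Spec_new_get_tprime; infer_instance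

-- ===== CLAIM (what is proved, stated in full; the proofs are below) =====
def Claim_equal_new_get_tprime : Prop := ∀ (n : Int) (tags : List String) (all_tags : List String), Dom_new_get_tprime n tags all_tags → Pre_new_get_tprime n tags all_tags → Spec_new_get_tprime n tags all_tags (new_get_tprime n tags all_tags)

-- ===== LEMMAS AND PROOFS =====

-- B's one step, as a named function for the proofs.
def pvStep (tags : List String) (res : List String) : List String :=
  res.flatMap (fun tp => tags.map (fun t => tp ++ t))

-- A's nested-append inner loop builds exactly one pvStep.
theorem goA_inner (tags at_ : List String) :
    at_.foldl (fun new_t tp => tags.foldl (fun acc t => acc ++ [tp ++ t]) new_t) []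
      = pvStep tags at_ := by
  suffices h : ∀ (init : List String),
      at_.foldl (fun new_t tp => tags.foldl (fun acc t => acc ++ [tp ++ t]) new_t) init
        = init ++ pvStep tags at_ by
    simpa using h []
  induction at_ with
  | nil => intro init; simp [pvStep]
  | cons tp rest ih =>
      intro init
      rw [List.foldl_cons, ih]
      simp only [pvStep, PySem.List.foldl_append_singleton_eq_map, List.flatMap_cons,
        List.append_assoc]

-- The const-function range fold is function iteration.
theorem foldl_range_iterate (f : List String → List String) :
    ∀ (m : Nat) (a : List String),
      (List.range m).foldl (fun r _ => f r) a = f^[m] a := by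
  intro m
  induction m with
  | zero => intro a; simp
  | succ k ih =>
      intro a
      rw [List.range_succ, List.foldl_append, ih, Function.iterate_succ_apply']
      simp

-- A's recursion with fuel k+1 is k iterations of pvStep.
theorem goA_iterate (tags : List String) :
    ∀ (k : Nat) (at_ : List String),
      new_get_tprime_go (k + 1) tags at_ = (pvStep tags)^[k] at_ := by
  intro k
  induction k with
  | zero => intro at_; simp [new_get_tprime_go]
  | succ j ih =>
      intro at_
      conv_lhs => rw [show j + 1 + 1 = Nat.succ (j + 1) from rfl, new_get_tprime_go]
      rw [if_neg (Nat.succ_ne_zero j), goA_inner, ih, ← Function.iterate_succ_apply]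

-- ===== VERDICT (by name: the statement is the Claim_ definition above) =====
theorem new_get_tprime_spec : Claim_equal_new_get_tprime := by
  intro n tags all_tags _ hpre
  unfold Spec_new_get_tprime new_get_tprime new_get_tprime_alt
  have hn : n.toNat = (n - 1).toNat + 1 := by
    unfold Pre_new_get_tprime at hpre; omega
  rw [hn, goA_iterate, foldl_range_iterate]
  rfl
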